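-- pv_equiv track=rewrite | github.com/ravatez/GFG-POTD | Easy/You and your books/you-and-your-books.py | max_Books
-- ===== SOURCE A (Python) =====
-- def max_Books(n, k, arr):
--     max_books = 0
--     current_sum = 0
--     start = 0
--
--     for end in range(n):
--         if arr[end] <= k:
--             current_sum += arr[end]
--             max_books = max(max_books, current_sum)
--         else:
--             while start <= end:
--                 current_sum -= arr[start]
--                 start += 1
--                 if arr[start-1] <= k:
--                     break
--             current_sum = 0  # Reset current sum as we are starting fresh after an invalid stack
--
--     return max_books
-- ===== SOURCE B (Python) =====
-- def max_Books(n, k, arr):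
--     # Phase 1: split the first n books into maximal runs of affordable (<= k) books.
--     xs = arr[:max(0, n)]
--     runs = []
--     cur = []
--     for x in xs:
--         if x <= k:
--             cur.append(x)
--         else:
--             if cur:
--                 runs.append(cur)
--             cur = []
--     if cur:
--         runs.append(cur)
--     # Phase 2: best is the largest prefix sum of any run, floored at 0.
--     best = 0
--     for run in runs:
--         s = 0
--         for x in run:
--             s += x
--             if s > best:
--                 best = s
--     return best
-- ===== Notes on version B (the rewrite author's own statement) =====
-- stated objective: simpler
-- what changed: Replaces A's single-pass scan with its dead 'start' pointer and inner while loop by a two-phase decomposition: partition the first n books into maximal runs of affordable (<= k) books, then take the best prefix sum of each run, floored at 0.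
-- outside the precondition, e.g. on max_Books(3, 5, [1, 2]): A raises IndexError, B returns 3
import Mathlib
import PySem

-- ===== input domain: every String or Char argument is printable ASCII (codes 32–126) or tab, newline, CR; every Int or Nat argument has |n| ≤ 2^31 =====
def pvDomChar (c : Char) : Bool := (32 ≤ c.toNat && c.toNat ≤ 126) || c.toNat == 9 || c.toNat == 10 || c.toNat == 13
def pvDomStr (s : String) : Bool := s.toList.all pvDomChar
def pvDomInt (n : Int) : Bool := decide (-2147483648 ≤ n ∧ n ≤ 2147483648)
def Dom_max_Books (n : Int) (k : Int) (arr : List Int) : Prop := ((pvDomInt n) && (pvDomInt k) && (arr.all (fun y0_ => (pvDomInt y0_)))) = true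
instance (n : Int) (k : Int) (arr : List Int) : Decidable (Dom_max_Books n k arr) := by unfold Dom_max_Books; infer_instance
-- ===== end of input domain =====

-- B replaces A's one-pass sliding scan (with its dead 'start' pointer and inner while) by a
-- two-phase decomposition: split the first n books into maximal runs of affordable ones, then
-- take the best prefix sum over each run, floored at 0 (objective: simpler).

-- ===== PORT A =====
-- the inner 'while start <= end' loop of A (only 'start' and 'current_sum' change; returns both)
def maxBooksDrop (k : Int) (arr : List Int) (e : Int) (start : Int) (cs : Int) : Int × Int :=
  if h : start ≤ e then
    let cs' := cs - PySem.List.pyGetD arr start 0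
    let start' := start + 1
    if PySem.List.pyGetD arr (start' - 1) 0 ≤ k then (cs', start')
    else maxBooksDrop k arr e start' cs'
  else (cs, start)
termination_by (e + 1 - start).toNat
decreasing_by omega

def max_Books (n : Int) (k : Int) (arr : List Int) : Int :=
  ((PySem.List.pyRange 0 n 1).foldl
    (fun (st : Int × Int × Int) e =>
      if PySem.List.pyGetD arr e 0 ≤ k then
        (max st.1 (st.2.1 + PySem.List.pyGetD arr e 0),
         st.2.1 + PySem.List.pyGetD arr e 0, st.2.2)
      else
        (st.1, 0, (maxBooksDrop k arr e st.2.2 st.2.1).2))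
    (0, 0, 0)).1

-- ===== PORT B =====
def max_Books_alt (n : Int) (k : Int) (arr : List Int) : Int :=
  let xs := PySem.List.slice arr none (some (max 0 n))
  let p := xs.foldl
    (fun (st : List (List Int) × List Int) x =>
      if x ≤ k then (st.1, st.2 ++ [x])
      else if st.2 ≠ [] then (st.1 ++ [st.2], ([] : List Int)) else (st.1, []))
    ([], [])
  let runs := if p.2 ≠ [] then p.1 ++ [p.2] else p.1
  runs.foldl
    (fun b run =>
      (run.foldl (fun (q : Int × Int) x =>
          (if q.2 + x > q.1 then q.2 + x else q.1, q.2 + x)) (b, 0)).1)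
    0

-- ===== PRECONDITION & SPEC =====
-- Python A raises IndexError when n > len(arr); that is all Pre_ excludes.
def Pre_max_Books (n : Int) (k : Int) (arr : List Int) : Prop := n ≤ (arr.length : Int)
instance (n : Int) (k : Int) (arr : List Int) : Decidable (Pre_max_Books n k arr) := by
  unfold Pre_max_Books; infer_instance
def pvWitness_max_Books : Int × Int × List Int := (3, 5, [1, 7, 2])

def Spec_max_Books (n : Int) (k : Int) (arr : List Int) (out : Int) : Prop := out = max_Books_alt n k arr
instance (n : Int) (k : Int) (arr : List Int) (out : Int) : Decidable (Spec_max_Books n k arr out) := by unfold Spec_max_Books; infer_instance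

-- ===== CLAIM (what is proved, stated in full; the proofs are below) =====
def Claim_equal_max_Books : Prop := ∀ (n : Int) (k : Int) (arr : List Int), Dom_max_Books n k arr → Pre_max_Books n k arr → Spec_max_Books n k arr (max_Books n k arr)

-- ===== LEMMAS AND PROOFS =====

-- proof-side names for the fold steps of the two ports
def sA (k : Int) (st : Int × Int) (x : Int) : Int × Int :=
  if x ≤ k then (max st.1 (st.2 + x), st.2 + x) else (st.1, 0)

def sB (q : Int × Int) (x : Int) : Int × Int :=
  (if q.2 + x > q.1 then q.2 + x else q.1, q.2 + x)

def buildStep (k : Int) (st : List (List Int) × List Int) (x : Int) : List (List Int) × List Int :=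
  if x ≤ k then (st.1, st.2 ++ [x])
  else if st.2 ≠ [] then (st.1 ++ [st.2], ([] : List Int)) else (st.1, [])

def bestOf (rs : List (List Int)) : Int :=
  rs.foldl (fun b run => (run.foldl sB (b, 0)).1) 0

-- the third state component ('start') never influences the returned maximum
lemma fold3_eq_fold2 (k : Int) (arr : List Int) (idxs : List Int) :
    ∀ (mb cs st : Int),
      ((idxs.foldl
        (fun (st : Int × Int × Int) e =>
          if PySem.List.pyGetD arr e 0 ≤ k then
            (max st.1 (st.2.1 + PySem.List.pyGetD arr e 0),
             st.2.1 + PySem.List.pyGetD arr e 0, st.2.2)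
          else
            (st.1, 0, (maxBooksDrop k arr e st.2.2 st.2.1).2))
        (mb, cs, st)).1)
      = ((idxs.foldl (fun acc e => sA k acc (PySem.List.pyGetD arr e 0)) (mb, cs)).1) := by
  induction idxs with
  | nil => intro mb cs st; rfl
  | cons e rest ih =>
      intro mb cs st
      simp only [List.foldl_cons]
      by_cases h : PySem.List.pyGetD arr e 0 ≤ k
      · rw [if_pos h, ih]; congr 1; simp [sA, h]
      · rw [if_neg h, ih]; congr 1; simp [sA, h]

lemma snd_foldl_sB (r : List Int) : ∀ (b s : Int), (r.foldl sB (b, s)).2 = s + r.sum := by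
  induction r with
  | nil => intro b s; simp
  | cons x t ih => intro b s; simp only [List.foldl_cons, sB, List.sum_cons]; rw [ih]; ring

lemma sB_eq_max (q : Int × Int) (x : Int) : sB q x = (max q.1 (q.2 + x), q.2 + x) := by
  unfold sB
  by_cases h : q.2 + x > q.1 <;> simp [h] <;> omega

lemma bestOf_append_singleton (rs : List (List Int)) (r : List Int) :
    bestOf (rs ++ [r]) = (r.foldl sB (bestOf rs, 0)).1 := by
  unfold bestOf; rw [List.foldl_append]; rfl

lemma bestOf_append_nil (rs : List (List Int)) : bestOf (rs ++ [[]]) = bestOf rs := by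
  rw [bestOf_append_singleton]; rfl

lemma main_invariant (k : Int) (l : List Int) :
    ∀ (runs : List (List Int)) (cur : List Int),
      bestOf (let p := l.foldl (buildStep k) (runs, cur);
              if p.2 ≠ [] then p.1 ++ [p.2] else p.1)
      = (l.foldl (sA k) (bestOf (runs ++ [cur]), cur.sum)).1 := by
  induction l with
  | nil =>
      intro runs cur
      by_cases h : cur = []
      · subst h; simp [bestOf_append_nil]
      · simp [h]
  | cons x t ih =>
      intro runs cur
      simp only [List.foldl_cons]
      by_cases hx : x ≤ k
      · have hb : buildStep k (runs, cur) x = (runs, cur ++ [x]) := by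
          simp [buildStep, hx]
        rw [hb, ih runs (cur ++ [x])]
        have h1 : bestOf (runs ++ [cur ++ [x]]) = max (bestOf (runs ++ [cur])) (cur.sum + x) := by
          rw [bestOf_append_singleton, bestOf_append_singleton]
          rw [List.foldl_append]
          simp only [List.foldl_cons, List.foldl_nil]
          rw [sB_eq_max, snd_foldl_sB]
          simp
        rw [h1]
        simp [sA, hx]
      · have hb : buildStep k (runs, cur) x
            = ((if cur ≠ [] then runs ++ [cur] else runs), ([] : List Int)) := by
          by_cases h : cur = [] <;> simp [buildStep, hx, h]
        rw [hb, ih]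
        have h2 : bestOf ((if cur ≠ [] then runs ++ [cur] else runs) ++ [[]])
            = bestOf (runs ++ [cur]) := by
          rw [bestOf_append_nil]
          by_cases h : cur = []
          · subst h; simp [bestOf_append_nil]
          · simp [h]
        rw [h2]
        simp [sA, hx]

-- B's value on any list, via the invariant started from the empty state
lemma alt_eq_foldl_sA (n k : Int) (arr : List Int) :
    max_Books_alt n k arr
      = ((PySem.List.slice arr none (some (max 0 n))).foldl (sA k) (0, 0)).1 := by
  unfold max_Books_alt
  have hstep : (fun (st : List (List Int) × List Int) x =>
      if x ≤ k then (st.1, st.2 ++ [x])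
      else if st.2 ≠ [] then (st.1 ++ [st.2], ([] : List Int)) else (st.1, []))
      = buildStep k := by
    funext st x; simp [buildStep]
  have hrun : (fun (b : Int) (run : List Int) =>
      (run.foldl (fun (q : Int × Int) x =>
          (if q.2 + x > q.1 then q.2 + x else q.1, q.2 + x)) (b, 0)).1)
      = (fun b run => (run.foldl sB (b, 0)).1) := by
    funext b run; rfl
  rw [hstep, hrun]
  have := main_invariant k (PySem.List.slice arr none (some (max 0 n))) [] []
  simp only [bestOf] at this ⊢
  simpa using this

theorem max_Books_spec_aux (n k : Int) (arr : List Int)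
    (hpre : n ≤ (arr.length : Int)) :
    max_Books n k arr = max_Books_alt n k arr := by
  rw [alt_eq_foldl_sA]
  unfold max_Books
  rw [fold3_eq_fold2]
  by_cases hn : n ≤ 0
  · have h1 : PySem.List.pyRange 0 n 1 = [] := PySem.List.pyRange_one_eq_nil hn
    have h2 : PySem.List.slice arr none (some (max 0 n)) = [] := by
      have : max 0 n = 0 := by omega
      rw [this]
      have := PySem.List.slice_to arr (b := 0) (by omega)
      simpa using this
    rw [h1, h2]
    rfl
  · push Not at hn
    set xs := arr.take n.toNat with hxs
    have hlen : (xs.length : Int) = n := by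
      simp [hxs, List.length_take]; omega
    have hsl : PySem.List.slice arr none (some (max 0 n)) = xs := by
      have hm : max 0 n = n := by omega
      rw [hm]
      have := PySem.List.slice_to arr (b := n) (by omega)
      simpa [hxs] using this
    rw [hsl]
    have hcg : (PySem.List.pyRange 0 n 1).foldl
        (fun acc e => sA k acc (PySem.List.pyGetD arr e 0)) ((0 : Int), (0 : Int))
        = (PySem.List.pyRange 0 n 1).foldl
        (fun acc e => sA k acc (PySem.List.pyGetD xs e 0)) ((0 : Int), (0 : Int)) := by
      apply PySem.List.foldl_congr_mem
      intro acc e he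
      have hb := (PySem.List.mem_pyRange_one).mp he
      have hget : PySem.List.pyGetD arr e 0 = PySem.List.pyGetD xs e 0 := by
        rw [PySem.List.pyGetD_eq_getElem arr 0 hb.1 (by omega),
            PySem.List.pyGetD_eq_getElem xs 0 hb.1 (by rw [hlen]; exact hb.2)]
        simp [hxs, List.getElem_take]
      rw [hget]
    rw [hcg, ← hlen]
    exact congrArg Prod.fst (PySem.List.foldl_pyRange_zero_pyGetD' xs 0 (sA k) (0, 0))

-- ===== VERDICT (by name: the statement is the Claim_ definition above) =====
theorem max_Books_spec : Claim_equal_max_Books := by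
  intro n k arr _ hpre
  unfold Spec_max_Books
  exact max_Books_spec_aux n k arr hpre
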